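-- pv_equiv track=rewrite | github.com/alddeul-hankki/AI | services/timetable_service.py | _normalize_bits
-- ===== SOURCE A (Python) =====
-- from typing import Dict, List, Tuple, Optional
--
-- SLOTS_PER_DAY = 288  # 5분 * 24시간
--
-- def _normalize_bits(bits: Optional[List[int]]) -> List[int]:
--     if not isinstance(bits, list):
--         return [0] * SLOTS_PER_DAY
--     n = len(bits)
--     out = [1 if x else 0 for x in bits]
--     if n < SLOTS_PER_DAY:
--         out.extend([0] * (SLOTS_PER_DAY - n))
--     elif n > SLOTS_PER_DAY:
--         out = out[:SLOTS_PER_DAY]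
--     return out
-- ===== SOURCE B (Python) =====
-- from typing import List, Optional
--
-- SLOTS_PER_DAY = 288  # 5분 * 24시간
--
-- def _normalize_bits(bits: Optional[List[int]]) -> List[int]:
--     if not isinstance(bits, list):
--         return [0] * SLOTS_PER_DAY
--     n = len(bits)
--     return [1 if (i < n and bits[i]) else 0 for i in range(SLOTS_PER_DAY)]
-- ===== Notes on version B (the rewrite author's own statement) =====
-- stated objective: simpler
-- what changed: Replaces A's map-then-pad/trim three-branch shape with a single index-driven comprehension over the fixed output range, producing the exact length directly and never scanning input elements past index 288.
import Mathlib
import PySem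

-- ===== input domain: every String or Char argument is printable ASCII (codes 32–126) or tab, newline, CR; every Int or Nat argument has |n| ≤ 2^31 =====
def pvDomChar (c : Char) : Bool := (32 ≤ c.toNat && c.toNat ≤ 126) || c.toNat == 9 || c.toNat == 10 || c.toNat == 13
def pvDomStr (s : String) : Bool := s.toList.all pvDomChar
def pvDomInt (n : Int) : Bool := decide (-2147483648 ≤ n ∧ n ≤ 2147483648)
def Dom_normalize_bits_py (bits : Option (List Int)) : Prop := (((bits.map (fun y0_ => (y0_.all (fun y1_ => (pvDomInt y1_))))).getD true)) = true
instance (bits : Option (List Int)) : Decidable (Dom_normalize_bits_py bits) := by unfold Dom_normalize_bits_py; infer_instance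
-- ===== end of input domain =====

set_option maxRecDepth 8000

-- B replaces A's map-then-pad/trim branches with one index-driven pass over the fixed
-- output range (objective: simpler).

-- ===== PORT A =====
-- if not isinstance(bits, list): return [0]*SLOTS_PER_DAY
-- out = [1 if x else 0 for x in bits]; pad with zeros or trim to SLOTS_PER_DAY
def normalize_bits_py (bits : Option (List Int)) : List Int :=
  match bits with
  | none => List.replicate 288 0
  | some l =>
    let n := l.length
    let out := l.map (fun x => if x ≠ 0 then (1 : Int) else 0)
    if n < 288 then out ++ List.replicate (288 - n) 0
    else if n > 288 then PySem.List.slice out none (some (288 : Int))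
    else out

-- ===== PORT B =====
-- return [1 if (i < n and bits[i]) else 0 for i in range(SLOTS_PER_DAY)]
def normalize_bits_py_alt (bits : Option (List Int)) : List Int :=
  match bits with
  | none => List.replicate 288 0
  | some l =>
    let n : Int := l.length
    (PySem.List.pyRange 0 288).map (fun i =>
      if i < n ∧ PySem.List.pyGetD l i 0 ≠ 0 then (1 : Int) else 0)

-- ===== PRECONDITION & SPEC =====
def Spec_normalize_bits_py (bits : Option (List Int)) (out : List Int) : Prop := out = normalize_bits_py_alt bits
instance (bits : Option (List Int)) (out : List Int) : Decidable (Spec_normalize_bits_py bits out) := by unfold Spec_normalize_bits_py; infer_instance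

-- ===== CLAIM (what is proved, stated in full; the proofs are below) =====
def Claim_equal_normalize_bits_py : Prop := ∀ (bits : Option (List Int)), Dom_normalize_bits_py bits → Spec_normalize_bits_py bits (normalize_bits_py bits)

-- ===== LEMMAS AND PROOFS =====

theorem alt_some_eq (l : List Int) :
    normalize_bits_py_alt (some l)
      = (List.range 288).map (fun (k : Nat) =>
          if (k : Int) < (l.length : Int) ∧ PySem.List.pyGetD l (k : Int) 0 ≠ 0 then (1 : Int) else 0) := by
  simp only [normalize_bits_py_alt]
  rw [show (288 : Int) = ((288 : Nat) : Int) by norm_num, PySem.List.pyRange_zero_natCast]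
  rw [List.map_map]
  exact List.map_congr_left (fun a ha => rfl)

theorem a_length (l : List Int) : (normalize_bits_py (some l)).length = 288 := by
  simp only [normalize_bits_py]
  split_ifs with h1 h2
  · simp; omega
  · rw [PySem.List.slice_to _ (by norm_num)]
    simp; omega
  · simp; omega

theorem main_eq (l : List Int) : normalize_bits_py (some l) = normalize_bits_py_alt (some l) := by
  rw [alt_some_eq]
  apply List.ext_getElem
  · rw [a_length]; simp
  intro k hk hk'
  have hk288 : k < 288 := by simpa [a_length] using hk
  simp only [List.getElem_map, List.getElem_range, PySem.List.pyGetD_natCast]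
  simp only [normalize_bits_py]
  by_cases hkn : k < l.length
  · have hklt : ((k : Int) < (l.length : Int)) := by exact_mod_cast hkn
    by_cases h1 : l.length < 288
    · simp only [if_pos h1]
      rw [List.getElem_append_left (by simpa using hkn)]
      simp [hklt, List.getElem?_eq_getElem hkn]
    · by_cases h2 : l.length > 288
      · simp only [if_neg h1, if_pos h2, PySem.List.slice_to _ (by norm_num : (0:Int) ≤ 288)]
        rw [List.getElem_take]
        simp [hklt, List.getElem?_eq_getElem hkn]
      · simp only [if_neg h1, if_neg h2]
        simp [hklt, List.getElem?_eq_getElem hkn]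
  · have hlt : l.length < 288 := by omega
    have hcond : ¬ ((k : Int) < (l.length : Int) ∧ l.getD k 0 ≠ 0) := by
      intro h; exact hkn (by exact_mod_cast h.1)
    rw [if_neg hcond]
    simp only [if_pos hlt]
    rw [List.getElem_append_right (by simpa using hkn)]
    simp

-- ===== VERDICT (by name: the statement is the Claim_ definition above) =====
theorem normalize_bits_py_spec : Claim_equal_normalize_bits_py := by
  intro bits _
  unfold Spec_normalize_bits_py
  cases bits with
  | none => rfl
  | some l => exact main_eq l
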